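-- pv_equiv track=rewrite | github.com/danielhuf/INF1026 | Tarefa_6/1920468_Daniel_Huf_T6.py | criaDicMinimo
-- ===== SOURCE A (Python) =====
-- def criaDicMinimo(dic):
--     novo={}
--     for produto,mercados in dic.items():
--         l_mercados_min=[]
--         l_precos=list(mercados.values())
--         minimo=l_precos[0]
--         for i in range(1,len(l_precos)):
--             if l_precos[i]<minimo:
--                 minimo=l_precos[i]
--         for mercado,preco in mercados.items():
--             if preco==minimo:
--                 l_mercados_min.append(mercado)
--         novo[produto]={minimo:l_mercados_min}
--     return novo
-- ===== SOURCE B (Python) =====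
-- def _cheapest(mercados):
--     itens = list(mercados.items())
--     mercado0, minimo = itens[0]
--     lista = [mercado0]
--     for mercado, preco in itens[1:]:
--         if preco < minimo:
--             minimo = preco
--             lista = [mercado]
--         elif preco == minimo:
--             lista.append(mercado)
--     return {minimo: lista}
--
-- def criaDicMinimo(dic):
--     return {produto: _cheapest(mercados) for produto, mercados in dic.items()}
-- ===== Notes on version B (the rewrite author's own statement) =====
-- stated objective: simpler
-- what changed: Each product's minimum and its cheapest-market list are computed in one accumulating pass over the items (reset the list on a strictly smaller price, append on a tie) instead of A's two separate scans (find-min loop, then collect loop), and the result dict is built as a comprehension over a helper.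
import Mathlib
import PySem

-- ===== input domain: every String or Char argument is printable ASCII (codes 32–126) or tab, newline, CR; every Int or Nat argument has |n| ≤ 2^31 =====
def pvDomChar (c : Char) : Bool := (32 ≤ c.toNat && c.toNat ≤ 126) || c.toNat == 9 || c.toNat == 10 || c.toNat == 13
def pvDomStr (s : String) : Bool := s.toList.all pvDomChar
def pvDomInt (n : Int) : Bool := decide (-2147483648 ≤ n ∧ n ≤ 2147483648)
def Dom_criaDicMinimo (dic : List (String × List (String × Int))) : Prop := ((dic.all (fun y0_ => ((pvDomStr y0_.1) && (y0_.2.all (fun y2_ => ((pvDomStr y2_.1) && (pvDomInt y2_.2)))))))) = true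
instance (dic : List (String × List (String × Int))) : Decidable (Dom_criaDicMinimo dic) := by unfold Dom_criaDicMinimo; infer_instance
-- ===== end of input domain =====

-- B replaces A's two scans per product (find-min pass, then collect pass) by one accumulating
-- pass over the items, written as a dict comprehension over a helper (objective: simpler).


-- ===== PORT A =====
-- The dict-of-dicts argument arrives as association lists; each dict a Python caller passes
-- is PySem.Dict.ofList of its list (duplicate keys collapse, last value, first position).
-- A-side helper: the value A stores for one product (min scan over the prices, then a
-- second scan collecting the markets at that price)
def pvValA (mercados : List (String × Int)) : List (Int × List String) :=
  match (PySem.Dict.ofList mercados).values with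
  | [] => []   -- Python raises IndexError at l_precos[0] here; excluded by Pre_
  | p0 :: rest =>
      let minimo := rest.foldl (fun m x => if x < m then x else m) p0
      [(minimo,
        (PySem.Dict.ofList mercados).items.foldl
          (fun l mp => if mp.2 == minimo then l ++ [mp.1] else l) [])]

def criaDicMinimo (dic : List (String × List (String × Int))) : List (String × List (Int × List String)) :=
  ((PySem.Dict.ofList dic).items.foldl
    (fun (novo : PySem.Dict String (List (Int × List String))) pm =>
      novo.insert pm.1 (pvValA pm.2))
    PySem.Dict.empty).items

-- ===== PORT B =====
def pvCheapest (mercados : List (String × Int)) : List (Int × List String) :=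
  match (PySem.Dict.ofList mercados).items with
  | [] => []   -- Python raises IndexError at itens[0] here; excluded by Pre_
  | (m0, p0) :: rest =>
      let st := rest.foldl
        (fun (st : Int × List String) mp =>
          if mp.2 < st.1 then (mp.2, [mp.1])
          else if mp.2 == st.1 then (st.1, st.2 ++ [mp.1]) else st)
        (p0, [m0])
      [(st.1, st.2)]

def criaDicMinimo_alt (dic : List (String × List (String × Int))) : List (String × List (Int × List String)) :=
  (PySem.Dict.ofList dic).items.map (fun pm => (pm.1, pvCheapest pm.2))

-- ===== PRECONDITION & SPEC =====
-- Pre_ excludes inputs with an empty inner price dict: there A raises IndexError (l_precos[0]).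
def Pre_criaDicMinimo (dic : List (String × List (String × Int))) : Prop :=
  ∀ p ∈ dic, p.2 ≠ []
instance (dic : List (String × List (String × Int))) : Decidable (Pre_criaDicMinimo dic) := by unfold Pre_criaDicMinimo; infer_instance

def pvWitness_criaDicMinimo : (List (String × List (String × Int))) :=
  [("arroz", [("m1", 3), ("m2", 2), ("m3", 2)]), ("feijao", [("m1", 7)])]

def Spec_criaDicMinimo (dic : List (String × List (String × Int))) (out : List (String × List (Int × List String))) : Prop := out = criaDicMinimo_alt dic
instance (dic : List (String × List (String × Int))) (out : List (String × List (Int × List String))) : Decidable (Spec_criaDicMinimo dic out) := by unfold Spec_criaDicMinimo; infer_instance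

-- ===== CLAIM (what is proved, stated in full; the proofs are below) =====
def Claim_equal_criaDicMinimo : Prop := ∀ (dic : List (String × List (String × Int))), Dom_criaDicMinimo dic → Pre_criaDicMinimo dic → Spec_criaDicMinimo dic (criaDicMinimo dic)

-- ===== LEMMAS AND PROOFS =====

-- membership through a dict-building fold: every stored pair comes from the source list
theorem pv_mem_items_foldl_insert {κ ν : Type} [BEq κ] [LawfulBEq κ]
    (l : List (κ × ν)) (d : PySem.Dict κ ν) (p : κ × ν)
    (h : p ∈ (l.foldl (fun d q => d.insert q.1 q.2) d).items) : p ∈ d.items ∨ p ∈ l := by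
  induction l generalizing d with
  | nil => exact Or.inl h
  | cons x t ih =>
    rcases ih (d.insert x.1 x.2) h with h' | h'
    · rcases (PySem.Dict.mem_items_insert _ _ _ _).mp h' with h'' | h''
      · exact Or.inr (by simp [h''])
      · exact Or.inl h''.1
    · exact Or.inr (List.mem_cons_of_mem _ h')

theorem pv_mem_items_ofList {κ ν : Type} [BEq κ] [LawfulBEq κ]
    (l : List (κ × ν)) (p : κ × ν) (h : p ∈ (PySem.Dict.ofList l).items) : p ∈ l := by
  rcases pv_mem_items_foldl_insert l PySem.Dict.empty p h with h' | h'
  · simp [PySem.Dict.empty] at h'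
  · exact h'

theorem pv_size_foldl_insert_ge {κ ν : Type} [BEq κ] [LawfulBEq κ]
    (l : List (κ × ν)) (d : PySem.Dict κ ν) :
    d.size ≤ (l.foldl (fun d q => d.insert q.1 q.2) d).size := by
  induction l generalizing d with
  | nil => exact le_refl _
  | cons x t ih =>
    have h1 : d.size ≤ (d.insert x.1 x.2).size := by
      rw [PySem.Dict.size_insert]; split <;> omega
    exact h1.trans (ih _)

theorem pv_items_ofList_ne_nil {κ ν : Type} [BEq κ] [LawfulBEq κ]
    (l : List (κ × ν)) (h : l ≠ []) : (PySem.Dict.ofList l).items ≠ [] := by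
  match l, h with
  | x :: t, _ =>
    have h1 : (PySem.Dict.empty.insert x.1 x.2).size ≤ (PySem.Dict.ofList (x :: t)).size :=
      pv_size_foldl_insert_ge t _
    intro hnil
    have hsz : (PySem.Dict.ofList (x :: t)).size = 0 := by
      simp [PySem.Dict.size, hnil]
    rw [PySem.Dict.size_insert, hsz] at h1
    rcases em (PySem.Dict.empty.contains x.1 = true) with hc | hc
    · rw [if_pos hc] at h1; simp [PySem.Dict.contains_empty] at hc
    · rw [if_neg hc] at h1; omega

-- running minimum never increases
theorem pv_foldmin_le (l : List (String × Int)) (mn : Int) :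
    l.foldl (fun m x => if x.2 < m then x.2 else m) mn ≤ mn := by
  induction l generalizing mn with
  | nil => exact le_refl _
  | cons x t ih =>
    simp only [List.foldl_cons]
    split
    · exact (ih x.2).trans (by omega)
    · exact ih mn

-- characterisation of B's single accumulating pass:
-- final state = (running minimum, kept markets determined by the final minimum)
theorem pv_bfold_char (l : List (String × Int)) (mn : Int) (acc : List String) :
    l.foldl
      (fun (st : Int × List String) mp =>
        if mp.2 < st.1 then (mp.2, [mp.1])
        else if mp.2 == st.1 then (st.1, st.2 ++ [mp.1]) else st)
      (mn, acc)
    = (l.foldl (fun m x => if x.2 < m then x.2 else m) mn,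
       (if l.foldl (fun m x => if x.2 < m then x.2 else m) mn = mn then acc else []) ++
         (l.filter (fun mp => mp.2 == l.foldl (fun m x => if x.2 < m then x.2 else m) mn)).map (·.1)) := by
  induction l generalizing mn acc with
  | nil => simp
  | cons x t ih =>
    have hle : t.foldl (fun m x => if x.2 < m then x.2 else m) (if x.2 < mn then x.2 else mn) ≤
        (if x.2 < mn then x.2 else mn) := pv_foldmin_le t _
    simp only [List.foldl_cons, List.filter_cons]
    by_cases h1 : x.2 < mn
    · rw [if_pos h1, ih]
      simp only [if_pos h1] at hle ⊢
      by_cases h2 : t.foldl (fun m x => if x.2 < m then x.2 else m) x.2 = x.2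
      · simp [h2, show ¬ (x.2 = mn) by omega]
      · have : ¬ t.foldl (fun m x => if x.2 < m then x.2 else m) x.2 = mn := by omega
        simp [h2, this, show (x.2 == t.foldl (fun m x => if x.2 < m then x.2 else m) x.2) = false by
          simp; omega]
    · rw [if_neg h1]
      by_cases h2 : x.2 = mn
      · rw [if_pos (by simp [h2]), ih]
        simp only [if_neg h1] at hle ⊢
        by_cases h3 : t.foldl (fun m x => if x.2 < m then x.2 else m) mn = mn
        · simp [h3, h2]
        · simp [h3, h2, show (mn == t.foldl (fun m x => if x.2 < m then x.2 else m) mn) = false by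
            simp; omega]
      · rw [if_neg (by simp [h2]), ih]
        simp only [if_neg h1] at hle ⊢
        have : (x.2 == t.foldl (fun m x => if x.2 < m then x.2 else m) mn) = false := by
          simp; omega
        simp [this]

-- per-product agreement: A's two scans equal B's helper on a nonempty inner dict
theorem pv_cheapest_eq (ms : List (String × Int)) (h : ms ≠ []) :
    pvValA ms = pvCheapest ms := by
  have hne := pv_items_ofList_ne_nil ms h
  unfold pvValA pvCheapest
  match hit : (PySem.Dict.ofList ms).items, hne with
  | (m0, p0) :: rest, _ =>
    have hval : (PySem.Dict.ofList ms).values = p0 :: rest.map (·.2) := by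
      simp [PySem.Dict.values, hit]
    rw [hval]
    simp only [List.foldl_map]
    rw [PySem.List.foldl_append_if, pv_bfold_char]
    have hle : rest.foldl (fun m x => if x.2 < m then x.2 else m) p0 ≤ p0 := pv_foldmin_le rest p0
    simp only [List.filter_cons]
    by_cases h3 : rest.foldl (fun m x => if x.2 < m then x.2 else m) p0 = p0
    · simp [h3]
    · simp [h3, show (p0 == rest.foldl (fun m x => if x.2 < m then x.2 else m) p0) = false by
        simp; omega]

-- ===== VERDICT (by name: the statement is the Claim_ definition above) =====
theorem criaDicMinimo_spec : Claim_equal_criaDicMinimo := by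
  intro dic _ hpre
  unfold Spec_criaDicMinimo criaDicMinimo criaDicMinimo_alt
  rw [PySem.Dict.items_foldl_insert_fresh (PySem.Dict.ofList dic).items
      (fun pm => pm.1) (fun pm => pvValA pm.2) PySem.Dict.empty
      (fun a _ => PySem.Dict.contains_empty a.1)
      (by simpa [PySem.Dict.keys] using PySem.Dict.nodup_keys_ofList dic)]
  simp only [PySem.Dict.empty, List.nil_append]
  apply List.map_congr_left
  intro pm hpm
  have hmem : pm ∈ dic := pv_mem_items_ofList dic pm hpm
  have := pv_cheapest_eq pm.2 (hpre pm hmem)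
  simp only [this]
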